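-- pv_equiv track=rewrite | github.com/Namle-git/Civil_3D_AI_Assistant | App_Data/jobs/triggered/scheduled_testing_webjob/ai_agent_functions.py | extract_function_text_from_assistant_output
-- ===== SOURCE A (Python) =====
-- def extract_function_text_from_assistant_output(code_str):
--     """
--     Extracts the function definition from the given code string, starting from 'def',
--     and removes the last line of the function.
--
--     Args:
--         code_str (str): The code as a string from which to extract the function.
--
--     Returns:
--         str: The extracted function code starting from 'def', omitting any preceding text
--              and the last line.
--     """
--     # Split the input string into lines
--     lines = code_str.strip().splitlines()
--
--     # Find the first line that starts with 'def'
--     function_lines = []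
--     function_started = False
--
--     for line in lines:
--         # Check if the line starts with 'def', indicating the function definition
--         if line.strip().startswith('def') or function_started:
--             function_started = True
--             function_lines.append(line)
--
--     # Remove the last line from the list of function lines
--     if function_lines:
--         function_lines = function_lines[:-1]  # Remove the last line
--
--     # Join the lines to form the full function text
--     function_text = '\n'.join(function_lines)
--
--     return function_text
-- ===== SOURCE B (Python) =====
-- def extract_function_text_from_assistant_output(code_str):
--     lines = code_str.strip().splitlines()
--     i = next((i for i, l in enumerate(lines) if l.strip().startswith('def')), None)
--     if i is None:
--         return ''
--     return '\n'.join(lines[i:-1])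
-- ===== Notes on version B (the rewrite author's own statement) =====
-- stated objective: simpler
-- what changed: Instead of A's flag-carrying accumulation loop that copies every line after the function header into a list and then truncates it, B locates the index of the first function-header line and returns the single slice lines[i:-1] joined.
import Mathlib
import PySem

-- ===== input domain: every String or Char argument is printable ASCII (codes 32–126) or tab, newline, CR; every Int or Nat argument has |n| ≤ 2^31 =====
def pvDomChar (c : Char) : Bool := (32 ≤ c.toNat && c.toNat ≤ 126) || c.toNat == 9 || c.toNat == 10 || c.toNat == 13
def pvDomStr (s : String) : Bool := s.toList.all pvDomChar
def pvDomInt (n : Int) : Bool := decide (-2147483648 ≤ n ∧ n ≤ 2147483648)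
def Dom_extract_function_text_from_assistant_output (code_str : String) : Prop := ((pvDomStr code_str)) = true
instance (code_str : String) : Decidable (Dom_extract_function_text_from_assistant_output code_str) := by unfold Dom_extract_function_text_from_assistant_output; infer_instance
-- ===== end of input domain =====

-- B replaces A's flag-carrying accumulation loop by find-first-'def'-index then one slice lines[i:-1]; objective: simpler.

-- ===== PORT A =====
-- one iteration of A's for-loop: state = (function_lines, function_started)
def pvStepA (s : List String × Bool) (line : String) : List String × Bool :=
  if PySem.Str.startswith (PySem.Str.strip line) "def" || s.2 then (s.1 ++ [line], true) else s

def extract_function_text_from_assistant_output (code_str : String) : String :=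
  let lines := PySem.Str.splitlines (PySem.Str.strip code_str)
  let st := lines.foldl pvStepA ([], false)
  let function_lines := st.1
  let function_lines :=
    if function_lines ≠ [] then PySem.List.slice function_lines none (some (-1)) else function_lines
  PySem.Str.join "\n" function_lines

-- ===== PORT B =====
def extract_function_text_from_assistant_output_alt (code_str : String) : String :=
  let lines := PySem.Str.splitlines (PySem.Str.strip code_str)
  match lines.findIdx? (fun l => PySem.Str.startswith (PySem.Str.strip l) "def") with
  | none => ""
  | some i => PySem.Str.join "\n" (PySem.List.slice lines (some (i : Int)) (some (-1)))

-- ===== PRECONDITION & SPEC =====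
def Spec_extract_function_text_from_assistant_output (code_str : String) (out : String) : Prop := out = extract_function_text_from_assistant_output_alt code_str
instance (code_str : String) (out : String) : Decidable (Spec_extract_function_text_from_assistant_output code_str out) := by unfold Spec_extract_function_text_from_assistant_output; infer_instance

-- ===== CLAIM (what is proved, stated in full; the proofs are below) =====
def Claim_equal_extract_function_text_from_assistant_output : Prop := ∀ (code_str : String), Dom_extract_function_text_from_assistant_output code_str → Spec_extract_function_text_from_assistant_output code_str (extract_function_text_from_assistant_output code_str)

-- ===== LEMMAS AND PROOFS =====

-- once started, A's loop appends every remaining line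
theorem pv_loop_started (ls : List String) (acc : List String) :
    ls.foldl pvStepA (acc, true) = (acc ++ ls, true) := by
  induction ls generalizing acc with
  | nil => simp
  | cons a l ih =>
    rw [List.foldl_cons]
    have h1 : pvStepA (acc, true) a = (acc ++ [a], true) := by simp [pvStepA]
    rw [h1, ih]
    simp

-- before starting, A's loop collects exactly the suffix starting at the first 'def' line
theorem pv_loop_not_started (ls : List String) (acc : List String) :
    (ls.foldl pvStepA (acc, false)).1
      = acc ++ (match ls.findIdx? (fun l => PySem.Str.startswith (PySem.Str.strip l) "def") with
                | none => [] | some i => ls.drop i) := by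
  induction ls generalizing acc with
  | nil => simp
  | cons a l ih =>
    rw [List.foldl_cons]
    by_cases h : PySem.Str.startswith (PySem.Str.strip a) "def"
    · have h' : PySem.Chars.startswith (PySem.Chars.strip a.toList) ['d','e','f'] = true := by
        simpa using h
      have h1 : pvStepA (acc, false) a = (acc ++ [a], true) := by simp [pvStepA, h']
      rw [h1, pv_loop_started, List.findIdx?_cons, h]
      simp
    · have h' : PySem.Chars.startswith (PySem.Chars.strip a.toList) ['d','e','f'] = false := by
        simpa using h
      have h1 : pvStepA (acc, false) a = (acc, false) := by simp [pvStepA, h']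
      rw [h1, ih, List.findIdx?_cons]
      simp only [h]
      cases hfi : l.findIdx? (fun l => PySem.Str.startswith (PySem.Str.strip l) "def") with
      | none => simp
      | some i => simp

theorem pv_findIdx?_lt_length {α : Type} (p : α → Bool) (ls : List α) (i : Nat)
    (h : ls.findIdx? p = some i) : i < ls.length := by
  induction ls generalizing i with
  | nil => simp at h
  | cons a l ih =>
    rw [List.findIdx?_cons] at h
    by_cases hp : p a
    · simp [hp] at h
      simp [List.length_cons]
      omega
    · simp [hp] at h
      obtain ⟨j, hj, rfl⟩ := h
      have := ih j hj
      simp; omega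

-- lines[i:-1] = (lines.drop i)[:-1] when i < length
theorem pv_slice_i_neg_one {α : Type} (xs : List α) (i : Nat) (h : i < xs.length) :
    PySem.List.slice xs (some (i : Int)) (some (-1)) = (xs.drop i).dropLast := by
  unfold PySem.List.slice PySem.List.clampIdx
  have hi0 : ¬ ((i : Int) < 0) := by omega
  have hneg : ((-1 : Int) < 0) := by norm_num
  have hlen : ¬ ((xs.length : Int) + -1 < 0) := by omega
  simp only [hi0, if_false, hneg, hlen, Int.toNat_natCast, List.dropLast_eq_take,
    List.length_drop, if_pos, Nat.min_eq_left h.le]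
  congr 1
  omega

-- ===== VERDICT (by name: the statement is the Claim_ definition above) =====
theorem extract_function_text_from_assistant_output_spec : Claim_equal_extract_function_text_from_assistant_output := by
  intro code_str _
  unfold Spec_extract_function_text_from_assistant_output
  unfold extract_function_text_from_assistant_output extract_function_text_from_assistant_output_alt
  set lines := PySem.Str.splitlines (PySem.Str.strip code_str) with hl
  simp only []
  rw [pv_loop_not_started lines []]
  cases hfi : lines.findIdx? (fun l => PySem.Str.startswith (PySem.Str.strip l) "def") with
  | none => simp
            rfl
  | some i =>
    have hi := pv_findIdx?_lt_length _ lines i hfi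
    have hne : lines.drop i ≠ [] := by
      intro hc
      have : (lines.drop i).length = lines.length - i := List.length_drop
      rw [hc] at this; simp at this; omega
    simp only [List.nil_append, ne_eq, hne, not_false_iff, if_pos]
    rw [PySem.List.slice_to_neg_one, pv_slice_i_neg_one lines i hi]
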